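-- pv_equiv track=rewrite | github.com/ooovector/qsweepy | instrument_drivers/ADS54J40EVM.py | encode_bits
-- ===== SOURCE A (Python) =====
-- def encode_bits (device, decoded):
-- 	b=15
-- 	if device == "LMK04828":
-- 		byte_mask = 0xa8
-- 	else:
-- 		byte_mask = 0xb0
-- 	sequence = []
-- 	for q in decoded:
-- 		address=[(q[0]&(2**(i))>0) for i in range(b,-1,-1)]
-- 		data=[(q[1]&(2**(i))>0) for i in range(7,-1,-1)]
-- 		sequence.append(address+data)
-- 	output=[0xb8]
-- 	for packet in sequence:
-- 		for bit in packet: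
-- 			output.extend([byte_mask|(bit*2), (byte_mask+1)|(bit*2)])
-- 		output.append(0xb8)
--
-- 	return(output)
-- ===== SOURCE B (Python) =====
-- def encode_bits(device, decoded):
--     byte_mask = 0xa8 if device == "LMK04828" else 0xb0
--     output = [0xb8]
--     for a, d in decoded:
--         # pack the 16 address bits and 8 data bits into one non-negative 24-bit word
--         word = (a % 65536) * 256 + d % 256
--         for i in range(23, -1, -1):
--             t = (word // 2 ** i) % 2 * 2
--             output += [byte_mask + t, byte_mask + 1 + t]
--         output.append(0xb8)
--     return output
-- ===== Notes on version B (the rewrite author's own statement) =====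
-- stated objective: simpler
-- what changed: B drops the intermediate per-pair bool-list 'sequence' entirely: it packs each (address,data) pair into one non-negative 24-bit word via modular arithmetic and emits the two bytes per bit in a single arithmetic pass (bit = (word // 2**i) % 2, byte = mask + 2*bit), instead of first building bool lists with bitwise & tests and then folding them with bitwise |.
import Mathlib
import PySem

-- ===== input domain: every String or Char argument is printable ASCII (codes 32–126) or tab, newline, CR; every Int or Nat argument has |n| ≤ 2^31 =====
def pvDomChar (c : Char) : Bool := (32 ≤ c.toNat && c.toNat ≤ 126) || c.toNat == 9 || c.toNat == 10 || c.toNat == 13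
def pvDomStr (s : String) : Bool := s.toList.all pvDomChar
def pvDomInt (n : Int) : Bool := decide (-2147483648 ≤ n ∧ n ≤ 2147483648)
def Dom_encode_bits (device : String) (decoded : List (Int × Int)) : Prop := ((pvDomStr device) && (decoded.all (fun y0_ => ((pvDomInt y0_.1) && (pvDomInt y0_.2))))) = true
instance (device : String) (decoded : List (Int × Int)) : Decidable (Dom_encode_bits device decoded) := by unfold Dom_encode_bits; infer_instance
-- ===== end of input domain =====

-- B replaces A's intermediate per-pair bool-list "sequence" by a single arithmetic pass that packs each
-- pair into one non-negative 24-bit word and reads bits by division/mod (objective: simpler).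


-- ===== PORT A =====
-- `2**i` with i drawn from range(b,-1,-1) / range(7,-1,-1): i is a non-negative Int there, so
-- (2:Int)^i.toNat is exact.
def encode_bits (device : String) (decoded : List (Int × Int)) : List Int :=
  let b : Int := 15
  let byte_mask : Int := if device == "LMK04828" then 0xa8 else 0xb0
  let sequence : List (List Bool) := decoded.foldl (fun seq q =>
    let address : List Bool := (PySem.List.pyRange b (-1) (-1)).map
      (fun i => decide (0 < PySem.Int.band q.1 ((2:Int)^i.toNat)))
    let data : List Bool := (PySem.List.pyRange 7 (-1) (-1)).map
      (fun i => decide (0 < PySem.Int.band q.2 ((2:Int)^i.toNat)))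
    seq ++ [address ++ data]) []
  sequence.foldl (fun output packet =>
    (packet.foldl (fun output bit =>
      output ++ [PySem.Int.bor byte_mask (cond bit 2 0),
                 PySem.Int.bor (byte_mask + 1) (cond bit 2 0)]) output) ++ [0xb8])
    [0xb8]

-- ===== PORT B =====
-- `2**i` with i from range(23,-1,-1): i is a non-negative Int, so (2:Int)^i.toNat is exact.
def encode_bits_alt (device : String) (decoded : List (Int × Int)) : List Int :=
  let byte_mask : Int := if device == "LMK04828" then 0xa8 else 0xb0
  decoded.foldl (fun output q =>
    let word : Int := PySem.Int.mod q.1 65536 * 256 + PySem.Int.mod q.2 256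
    ((PySem.List.pyRange 23 (-1) (-1)).foldl (fun output i =>
      let t : Int := PySem.Int.mod (PySem.Int.floordiv word ((2:Int)^i.toNat)) 2 * 2
      output ++ [byte_mask + t, byte_mask + 1 + t]) output) ++ [0xb8])
    [0xb8]

-- ===== PRECONDITION & SPEC =====
def Spec_encode_bits (device : String) (decoded : List (Int × Int)) (out : List Int) : Prop := out = encode_bits_alt device decoded
instance (device : String) (decoded : List (Int × Int)) (out : List Int) : Decidable (Spec_encode_bits device decoded out) := by unfold Spec_encode_bits; infer_instance

-- ===== CLAIM (what is proved, stated in full; the proofs are below) =====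
def Claim_equal_encode_bits : Prop := ∀ (device : String) (decoded : List (Int × Int)), Dom_encode_bits device decoded → Spec_encode_bits device decoded (encode_bits device decoded)

-- ===== LEMMAS AND PROOFS =====

theorem two_pow_toNat (i : Nat) : ((2:Int)^i).toNat = 2^i := by
  rw [show ((2:Int)^i) = ((2^i : Nat) : Int) by push_cast; ring]; exact Int.toNat_natCast _

theorem band_two_pow_pos_iff (a : Int) (i : Nat) :
    0 < PySem.Int.band a ((2:Int)^i) ↔ a.testBit i = true := by
  cases a with
  | ofNat m =>
      simp only [PySem.Int.band, Int.testBit]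
      rw [if_pos (by exact Int.natCast_nonneg m), if_pos (by positivity), two_pow_toNat]
      simp only [Nat.and_two_pow]
      cases hb : m.testBit i <;> simp [hb]
  | negSucc m =>
      simp only [PySem.Int.band, Int.testBit]
      rw [if_neg (by omega), if_pos (by positivity), two_pow_toNat]
      have hm : (-(Int.negSucc m) - 1).toNat = m := by
        rw [Int.neg_negSucc]; omega
      rw [hm, Nat.two_pow_and]
      have hpow : 0 < 2^i := Nat.two_pow_pos i
      cases hb : m.testBit i <;> simp

theorem testBit_toNat_emod (a : Int) (k i : Nat) (h : i < k) :
    ((a % ((2^k : Nat) : Int)).toNat).testBit i = a.testBit i := by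
  cases a with
  | ofNat m =>
      rw [show ((Int.ofNat m) % ((2^k : Nat) : Int)) = (((m % 2^k : Nat)) : Int) from Int.ofNat_mod_ofNat m _]
      rw [Int.toNat_natCast, Nat.testBit_mod_two_pow]
      simp [Int.testBit, h]
  | negSucc m =>
      have hpos : (0:Int) < ((2^k : Nat) : Int) := by positivity
      rw [Int.negSucc_emod m hpos]
      have hmod : ((m:Int) % ((2^k : Nat) : Int)) = ((m % 2^k : Nat) : Int) := Int.ofNat_mod_ofNat m _
      rw [hmod]
      have hlt : m % 2^k < 2^k := Nat.mod_lt _ (Nat.two_pow_pos k)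
      have : (((2^k : Nat) : Int) - 1 - ((m % 2^k : Nat) : Int)).toNat = 2^k - (m % 2^k + 1) := by omega
      rw [this, Nat.testBit_two_pow_sub_succ (by omega)]
      simp [Int.testBit, h, Nat.testBit_mod_two_pow]

theorem word_bit (a d : Int) (j : Nat) (hj : j < 24) :
    PySem.Int.mod (PySem.Int.floordiv (PySem.Int.mod a 65536 * 256 + PySem.Int.mod d 256) ((2:Int)^j)) 2
      = if (if j < 8 then d.testBit j else a.testBit (j - 8)) then 1 else 0 := by
  have h16 : ((65536:Int)) = ((2^16 : Nat) : Int) := by norm_num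
  have h8 : ((256:Int)) = ((2^8 : Nat) : Int) := by norm_num
  set m : Nat := (a % ((2^16 : Nat) : Int)).toNat with hm
  set n : Nat := (d % ((2^8 : Nat) : Int)).toNat with hn
  have hma : PySem.Int.mod a 65536 = ((m : Nat) : Int) := by
    rw [PySem.Int.mod_eq_emod_of_pos (by norm_num : (0:Int) < 65536), h16, hm,
      Int.toNat_of_nonneg (Int.emod_nonneg a (by positivity))]
  have hnd : PySem.Int.mod d 256 = ((n : Nat) : Int) := by
    rw [PySem.Int.mod_eq_emod_of_pos (by norm_num : (0:Int) < 256), h8, hn,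
      Int.toNat_of_nonneg (Int.emod_nonneg d (by positivity))]
  have hnlt : n < 2^8 := by
    have := Int.emod_lt_of_pos d (b := ((2^8 : Nat) : Int)) (by positivity)
    omega
  have hword : PySem.Int.mod a 65536 * 256 + PySem.Int.mod d 256 = ((2^8 * m + n : Nat) : Int) := by
    rw [hma, hnd]; push_cast; ring
  rw [hword, PySem.Int.floordiv_eq_ediv_of_pos (by positivity),
    PySem.Int.mod_eq_emod_of_pos (by norm_num : (0:Int) < 2),
    show ((2:Int)^j) = ((2^j : Nat) : Int) by push_cast; ring,
    Int.ofNat_ediv_ofNat, show ((2:Int)) = ((2 : Nat) : Int) from rfl, Int.ofNat_mod_ofNat]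
  have hbit : ((2^8 * m + n) / 2^j) % 2 = ((2^8 * m + n).testBit j).toNat := by
    have h2 : (2^8 * m + n) / 2^j % 2 < 2 := Nat.mod_lt _ (by norm_num)
    have h02 : (2^8 * m + n) / 2^j % 2 = 0 ∨ (2^8 * m + n) / 2^j % 2 = 1 := by omega
    rw [Nat.testBit_eq_decide_div_mod_eq]
    rcases h02 with h | h <;> rw [h] <;> simp
  rw [hbit, Nat.testBit_two_pow_mul_add m hnlt j]
  by_cases hj8 : j < 8
  · rw [if_pos hj8]
    have hd : n.testBit j = d.testBit j := testBit_toNat_emod d 8 j hj8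
    rw [hd]
    cases hb : d.testBit j <;> simp [hj8]
  · rw [if_neg hj8]
    have ha : m.testBit (j - 8) = a.testBit (j - 8) := testBit_toNat_emod a 16 (j - 8) (by omega)
    rw [ha]
    cases hb : a.testBit (j - 8) <;> simp [hj8]

theorem range15_eq : PySem.List.pyRange 15 (-1) (-1) = (List.range 16).reverse.map (fun n => (n:Int)) := by decide
theorem range7_eq : PySem.List.pyRange 7 (-1) (-1) = (List.range 8).reverse.map (fun n => (n:Int)) := by decide
theorem range23_eq : PySem.List.pyRange 23 (-1) (-1)
    = ((List.range 16).reverse.map (fun n => ((n:Int)+8))) ++ ((List.range 8).reverse.map (fun n => (n:Int))) := by decide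

theorem pair_addr (mask a d : Int) (hm : mask = 0xa8 ∨ mask = 0xb0) (n : Nat) (h : n < 16) :
    [PySem.Int.bor mask (cond (decide (0 < PySem.Int.band a ((2:Int)^((n:Int)).toNat))) 2 0),
     PySem.Int.bor (mask+1) (cond (decide (0 < PySem.Int.band a ((2:Int)^((n:Int)).toNat))) 2 0)]
    = [mask + PySem.Int.mod (PySem.Int.floordiv (PySem.Int.mod a 65536 * 256 + PySem.Int.mod d 256) ((2:Int)^(((n:Int)+8)).toNat)) 2 * 2,
       mask + 1 + PySem.Int.mod (PySem.Int.floordiv (PySem.Int.mod a 65536 * 256 + PySem.Int.mod d 256) ((2:Int)^(((n:Int)+8)).toNat)) 2 * 2] := by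
  have h1 : ((n:Int)).toNat = n := Int.toNat_natCast n
  have h2 : (((n:Int))+8).toNat = n + 8 := by
    rw [show ((n:Int)+8) = ((n+8 : Nat) : Int) by push_cast; ring, Int.toNat_natCast]
  rw [h1, h2, word_bit a d (n+8) (by omega : n+8 < 24)]
  rw [if_neg (show ¬ (n+8 < 8) by omega), Nat.add_sub_cancel]
  have hb' : decide (0 < PySem.Int.band a ((2:Int)^n)) = a.testBit n := by
    cases hb : a.testBit n
    · simp [band_two_pow_pos_iff, hb]
    · simp [band_two_pow_pos_iff, hb]
  rw [hb']
  cases hb : a.testBit n <;> rcases hm with h|h <;> subst h <;> decide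

theorem pair_data (mask a d : Int) (hm : mask = 0xa8 ∨ mask = 0xb0) (n : Nat) (h : n < 8) :
    [PySem.Int.bor mask (cond (decide (0 < PySem.Int.band d ((2:Int)^((n:Int)).toNat))) 2 0),
     PySem.Int.bor (mask+1) (cond (decide (0 < PySem.Int.band d ((2:Int)^((n:Int)).toNat))) 2 0)]
    = [mask + PySem.Int.mod (PySem.Int.floordiv (PySem.Int.mod a 65536 * 256 + PySem.Int.mod d 256) ((2:Int)^((n:Int)).toNat)) 2 * 2,
       mask + 1 + PySem.Int.mod (PySem.Int.floordiv (PySem.Int.mod a 65536 * 256 + PySem.Int.mod d 256) ((2:Int)^((n:Int)).toNat)) 2 * 2] := by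
  have h1 : ((n:Int)).toNat = n := Int.toNat_natCast n
  rw [h1, word_bit a d n (by omega : n < 24), if_pos h]
  have hb' : decide (0 < PySem.Int.band d ((2:Int)^n)) = d.testBit n := by
    cases hb : d.testBit n
    · simp [band_two_pow_pos_iff, hb]
    · simp [band_two_pow_pos_iff, hb]
  rw [hb']
  cases hb : d.testBit n <;> rcases hm with h|h <;> subst h <;> decide

theorem block_eq (mask a d : Int) (hm : mask = 0xa8 ∨ mask = 0xb0) :
    (((PySem.List.pyRange 15 (-1) (-1)).map (fun i => decide (0 < PySem.Int.band a ((2:Int)^i.toNat)))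
      ++ (PySem.List.pyRange 7 (-1) (-1)).map (fun i => decide (0 < PySem.Int.band d ((2:Int)^i.toNat)))).flatMap
        (fun bit => [PySem.Int.bor mask (cond bit 2 0), PySem.Int.bor (mask+1) (cond bit 2 0)]))
    = (PySem.List.pyRange 23 (-1) (-1)).flatMap (fun i =>
        [mask + PySem.Int.mod (PySem.Int.floordiv (PySem.Int.mod a 65536 * 256 + PySem.Int.mod d 256) ((2:Int)^i.toNat)) 2 * 2,
         mask + 1 + PySem.Int.mod (PySem.Int.floordiv (PySem.Int.mod a 65536 * 256 + PySem.Int.mod d 256) ((2:Int)^i.toNat)) 2 * 2]) := by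
  rw [range15_eq, range7_eq, range23_eq]
  simp only [List.flatMap_append, List.flatMap_map]
  congr 1
  · apply List.flatMap_congr
    intro k hk
    simp only [List.bind_eq_flatMap, List.mem_flatMap, List.mem_reverse, List.mem_range,
      List.mem_pure] at hk
    obtain ⟨n, hn16, rfl⟩ := hk
    exact pair_addr mask a d hm n hn16
  · apply List.flatMap_congr
    intro k hk
    simp only [List.bind_eq_flatMap, List.mem_flatMap, List.mem_reverse, List.mem_range,
      List.mem_pure] at hk
    obtain ⟨n, hn8, rfl⟩ := hk
    exact pair_data mask a d hm n hn8

theorem loopA (mask : Int) (seq : List (List Bool)) (out : List Int) :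
    seq.foldl (fun output packet =>
      (packet.foldl (fun output bit =>
        output ++ [PySem.Int.bor mask (cond bit 2 0), PySem.Int.bor (mask + 1) (cond bit 2 0)]) output) ++ [0xb8]) out
    = out ++ seq.flatMap (fun packet =>
        packet.flatMap (fun bit => [PySem.Int.bor mask (cond bit 2 0), PySem.Int.bor (mask + 1) (cond bit 2 0)]) ++ [0xb8]) := by
  induction seq generalizing out with
  | nil => simp
  | cons p l ih =>
      rw [List.foldl_cons, List.flatMap_cons, ih, PySem.List.foldl_append_eq_flatMap]
      simp [List.append_assoc]

theorem loopB (mask : Int) (l : List (Int × Int)) (out : List Int) :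
    l.foldl (fun output q =>
      ((PySem.List.pyRange 23 (-1) (-1)).foldl (fun output i =>
        output ++ [mask + PySem.Int.mod (PySem.Int.floordiv (PySem.Int.mod q.1 65536 * 256 + PySem.Int.mod q.2 256) ((2:Int)^i.toNat)) 2 * 2,
                   mask + 1 + PySem.Int.mod (PySem.Int.floordiv (PySem.Int.mod q.1 65536 * 256 + PySem.Int.mod q.2 256) ((2:Int)^i.toNat)) 2 * 2]) output) ++ [0xb8]) out
    = out ++ l.flatMap (fun q =>
        (PySem.List.pyRange 23 (-1) (-1)).flatMap (fun i =>
          [mask + PySem.Int.mod (PySem.Int.floordiv (PySem.Int.mod q.1 65536 * 256 + PySem.Int.mod q.2 256) ((2:Int)^i.toNat)) 2 * 2,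
           mask + 1 + PySem.Int.mod (PySem.Int.floordiv (PySem.Int.mod q.1 65536 * 256 + PySem.Int.mod q.2 256) ((2:Int)^i.toNat)) 2 * 2]) ++ [0xb8]) := by
  induction l generalizing out with
  | nil => simp
  | cons q l ih =>
      rw [List.foldl_cons, List.flatMap_cons, ih, PySem.List.foldl_append_eq_flatMap]
      simp [List.append_assoc]

-- ===== VERDICT (by name: the statement is the Claim_ definition above) =====
theorem encode_bits_spec : Claim_equal_encode_bits := by
  intro device decoded _
  unfold Spec_encode_bits encode_bits encode_bits_alt
  dsimp only
  rw [PySem.List.foldl_append_singleton_eq_map, List.nil_append]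
  have hm : (if device == "LMK04828" then (0xa8:Int) else 0xb0) = 0xa8 ∨
      (if device == "LMK04828" then (0xa8:Int) else 0xb0) = 0xb0 := by
    by_cases h : device == "LMK04828" <;> simp [h]
  rw [loopA, loopB]
  congr 1
  rw [List.flatMap_map]
  apply List.flatMap_congr
  intro q _
  rw [block_eq _ q.1 q.2 hm]
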